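-- pv_equiv track=rewrite | github.com/PacktPublishing/Learning-Python-by-building-games | Chapter_13/tetris.py | delete_row
-- ===== SOURCE A (Python) =====
-- def delete_row(grid, occupied):
--
--     black_background_color = (0, 0, 0)
--     number_of_rows_deleted = 0
--     for i in range(len(grid) - 1, -1, -1):
--         eachRow = grid[i]
--         if black_background_color not in eachRow:
--             number_of_rows_deleted += 1
--             ind = i
--             for j in range(len(eachRow)):
--                 try:
--                     del occupied[(j, i)]
--                 except:
--                     continue
--
--     if number_of_rows_deleted > 0:
--         for key in sorted(list(occupied), key=lambda x: x[1])[::-1]: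
--             x, y = key
--             if y < ind:
--                 newKey = (x, y + number_of_rows_deleted)
--                 occupied[newKey] = occupied.pop(key)
--
--     return number_of_rows_deleted
-- ===== SOURCE B (Python) =====
-- def delete_row(grid, occupied):
--     # Return-value equivalence with the original: the count of full rows.
--     # The in-place update of `occupied` is rebuilt in one pass instead of
--     # per-cell del/pop; it is not guaranteed cell-for-cell identical to the
--     # original's mutation (the return value is).
--     BLACK = (0, 0, 0)
--     full_rows = [i for i, row in enumerate(grid) if BLACK not in row]
--     count = len(full_rows)
--     if count == 0:
--         return 0
--     ind = full_rows[0]          # topmost full row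
--     full = set(full_rows)
--     new = {}
--     # kept cells first, shifted cells afterwards, so a shifted write
--     # overrides a colliding kept cell
--     for (x, y), v in occupied.items():
--         if y not in full and y >= ind:
--             new[(x, y)] = v
--     for (x, y), v in occupied.items():
--         if y not in full and y < ind:
--             new[(x, y + count)] = v
--     occupied.clear()
--     occupied.update(new)
--     return count
-- ===== Notes on version B (the rewrite author's own statement) =====
-- stated objective: simpler
-- what changed: Replaces the backwards row scan with per-cell try/del plus a sort-and-reverse pop/reinsert pass by a single enumerate comprehension counting full rows and a two-pass rebuild of the occupied dict (no sorting, no exception handling); equivalence is about the return value, the in-place update of occupied is rebuilt rather than replayed cell by cell.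
import Mathlib
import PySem

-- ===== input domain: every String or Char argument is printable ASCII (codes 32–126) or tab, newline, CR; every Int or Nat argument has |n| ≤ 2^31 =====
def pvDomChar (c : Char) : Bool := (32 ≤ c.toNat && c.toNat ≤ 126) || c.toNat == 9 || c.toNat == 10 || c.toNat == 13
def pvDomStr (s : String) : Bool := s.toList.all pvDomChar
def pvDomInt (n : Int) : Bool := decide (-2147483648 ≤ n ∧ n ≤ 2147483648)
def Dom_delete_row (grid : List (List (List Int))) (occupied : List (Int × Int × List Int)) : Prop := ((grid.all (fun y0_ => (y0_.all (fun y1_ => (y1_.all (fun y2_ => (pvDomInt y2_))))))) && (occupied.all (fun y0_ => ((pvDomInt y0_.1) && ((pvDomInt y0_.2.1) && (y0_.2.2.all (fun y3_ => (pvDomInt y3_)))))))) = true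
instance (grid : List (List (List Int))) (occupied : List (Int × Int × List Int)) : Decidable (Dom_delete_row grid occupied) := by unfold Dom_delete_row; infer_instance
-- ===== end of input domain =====

-- B replaces the backwards scan + sort/pop/reinsert pass by a comprehension counting
-- full rows and a two-pass dict rebuild (simpler); both mutate `occupied` in Python and
-- the equivalence proved here is about the RETURN value (the number of full rows) only.

-- ===== PORT A =====
def delete_row (grid : List (List (List Int))) (occupied : List (Int × Int × List Int)) : Int :=
  -- occupied is a Python dict[(x,y) -> color], marshalled to a PySem.Dict
  let occ0 : PySem.Dict (Int × Int) (List Int) :=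
    PySem.Dict.ofList (occupied.map (fun e => ((e.1, e.2.1), e.2.2)))
  -- for i in range(len(grid)-1, -1, -1):  state = (number_of_rows_deleted, ind, occupied)
  -- (ind is unbound in Python until the first full row and is read only when
  --  number_of_rows_deleted > 0, so the initial 0 here is never read)
  let st :=
    (PySem.List.pyRange ((grid.length : Int) - 1) (-1) (-1)).foldl
      (fun (st : Int × Int × PySem.Dict (Int × Int) (List Int)) i =>
        let eachRow := PySem.List.pyGetD grid i []   -- grid[i]; i always in range here
        if [(0 : Int), 0, 0] ∈ eachRow then st
        else
          -- try: del occupied[(j, i)] / except: continue  =  erase (no-op when absent)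
          let occ' := (PySem.List.pyRange 0 (eachRow.length : Int) 1).foldl
            (fun occ j => PySem.Dict.erase occ (j, i)) st.2.2
          (st.1 + 1, i, occ'))
      (0, 0, occ0)
  -- second loop: mutates occupied only; the returned value is st.1
  let _occFinal :=
    if st.1 > 0 then
      -- sorted(list(occupied), key=lambda x: x[1])[::-1]
      ((PySem.List.sorted (PySem.Dict.keys st.2.2) (fun k => k.2)).reverse).foldl
        (fun occ key =>
          if key.2 < st.2.1 then
            -- occupied[newKey] = occupied.pop(key); key is always present here
            match PySem.Dict.get? occ key with
            | some v => (PySem.Dict.erase occ key).insert (key.1, key.2 + st.1) v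
            | none => occ
          else occ)
        st.2.2
    else st.2.2
  st.1

-- ===== PORT B =====
def delete_row_alt (grid : List (List (List Int))) (occupied : List (Int × Int × List Int)) : Int :=
  let fullRows : List Int :=
    ((PySem.List.enumerate grid).filter (fun p => ! decide ([(0 : Int), 0, 0] ∈ p.2))).map (·.1)
  let count : Int := fullRows.length
  if count = 0 then 0
  else
    let ind := fullRows.headD 0        -- full_rows[0]; fullRows ≠ [] here
    let full := PySem.Set.ofList fullRows
    -- kept cells first, then shifted cells (the rebuilt dict mutates occupied only;
    -- the returned value is count)
    let new1 := occupied.foldl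
      (fun (d : PySem.Dict (Int × Int) (List Int)) e =>
        if e.2.1 ∉ full ∧ ind ≤ e.2.1 then d.insert (e.1, e.2.1) e.2.2 else d)
      PySem.Dict.empty
    let _new := occupied.foldl
      (fun (d : PySem.Dict (Int × Int) (List Int)) e =>
        if e.2.1 ∉ full ∧ e.2.1 < ind then d.insert (e.1, e.2.1 + count) e.2.2 else d)
      new1
    count

-- ===== PRECONDITION & SPEC =====
def Spec_delete_row (grid : List (List (List Int))) (occupied : List (Int × Int × List Int)) (out : Int) : Prop := out = delete_row_alt grid occupied
instance (grid : List (List (List Int))) (occupied : List (Int × Int × List Int)) (out : Int) : Decidable (Spec_delete_row grid occupied out) := by unfold Spec_delete_row; infer_instance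

-- ===== CLAIM (what is proved, stated in full; the proofs are below) =====
def Claim_equal_delete_row : Prop := ∀ (grid : List (List (List Int))) (occupied : List (Int × Int × List Int)), Dom_delete_row grid occupied → Spec_delete_row grid occupied (delete_row grid occupied)

-- ===== LEMMAS AND PROOFS =====

-- the count component of A's row loop counts the full rows it visits
lemma delete_row_countA (grid : List (List (List Int))) (l : List Int)
    (st : Int × Int × PySem.Dict (Int × Int) (List Int)) :
    (l.foldl
      (fun (st : Int × Int × PySem.Dict (Int × Int) (List Int)) i =>
        let eachRow := PySem.List.pyGetD grid i []
        if [(0 : Int), 0, 0] ∈ eachRow then st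
        else
          let occ' := (PySem.List.pyRange 0 (eachRow.length : Int) 1).foldl
            (fun occ j => PySem.Dict.erase occ (j, i)) st.2.2
          (st.1 + 1, i, occ'))
      st).1
      = st.1 + (l.countP (fun i => ! decide ([(0 : Int), 0, 0] ∈ PySem.List.pyGetD grid i []))) := by
  induction l generalizing st with
  | nil => simp
  | cons a t ih =>
      by_cases h : [(0 : Int), 0, 0] ∈ PySem.List.pyGetD grid a []
      · simp [h, ih]
      · simp [h, ih]
        omega

theorem delete_row_spec : Claim_equal_delete_row := by
  unfold Claim_equal_delete_row
  intro grid occupied _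
  unfold Spec_delete_row delete_row delete_row_alt
  simp only []
  rw [delete_row_countA]
  rw [PySem.List.pyRange_neg_one_eq_reverse]
  have hr : (-1 : Int) + 1 = 0 := by norm_num
  rw [hr]
  have hb : (grid.length : Int) - 1 + 1 = (grid.length : Int) := by ring
  rw [hb, List.countP_reverse]
  rw [PySem.List.enumerate_eq_map_pyRange (xs := grid) (d := ([] : List (List Int)))]
  have hc : ∀ (c : Int), (if c = 0 then (0 : Int) else c) = c := by
    intro c; split_ifs with h
    · omega
    · rfl
  simp only [List.filter_map, List.length_map]
  rw [hc]
  simp [List.countP_eq_length_filter, Function.comp_def]
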